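-- pv_equiv track=rewrite | github.com/yekrangian/mitre-attack | generate_mitre_attack_csv.py | get_attack_id_and_matrix
-- ===== SOURCE A (Python) =====
-- MATRIX_MAP = {
--     "mitre-attack": "Enterprise",
--     "mitre-ics-attack": "ICS",
--     "mitre-mobile-attack": "Mobile",
-- }
--
-- def get_attack_id_and_matrix(obj):
--     """Return (external_id, matrix_name) derived from external_references."""
--     for ref in obj.get("external_references", []):
--         src = ref.get("source_name")
--         if src in MATRIX_MAP and "external_id" in ref:
--             return ref["external_id"], MATRIX_MAP[src]
--     # fallback if no matching source_name
--     for ref in obj.get("external_references", []):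
--         if "external_id" in ref:
--             return ref["external_id"], ""
--     return "", ""
-- ===== SOURCE B (Python) =====
-- MATRIX_MAP = {
--     "mitre-attack": "Enterprise",
--     "mitre-ics-attack": "ICS",
--     "mitre-mobile-attack": "Mobile",
-- }
--
-- def get_attack_id_and_matrix(obj):
--     """Return (external_id, matrix_name) derived from external_references."""
--     fallback = None
--     for ref in obj.get("external_references", []):
--         if "external_id" in ref:
--             src = ref.get("source_name")
--             if src in MATRIX_MAP:
--                 return ref["external_id"], MATRIX_MAP[src]
--             if fallback is None:
--                 fallback = ref["external_id"]
--     return (fallback, "") if fallback is not None else ("", "")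
-- ===== Notes on version B (the rewrite author's own statement) =====
-- stated objective: simpler
-- what changed: Replaces A's two full passes over external_references with a single pass that returns immediately on a matrix match and remembers the first external_id as a fallback.
import Mathlib
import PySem

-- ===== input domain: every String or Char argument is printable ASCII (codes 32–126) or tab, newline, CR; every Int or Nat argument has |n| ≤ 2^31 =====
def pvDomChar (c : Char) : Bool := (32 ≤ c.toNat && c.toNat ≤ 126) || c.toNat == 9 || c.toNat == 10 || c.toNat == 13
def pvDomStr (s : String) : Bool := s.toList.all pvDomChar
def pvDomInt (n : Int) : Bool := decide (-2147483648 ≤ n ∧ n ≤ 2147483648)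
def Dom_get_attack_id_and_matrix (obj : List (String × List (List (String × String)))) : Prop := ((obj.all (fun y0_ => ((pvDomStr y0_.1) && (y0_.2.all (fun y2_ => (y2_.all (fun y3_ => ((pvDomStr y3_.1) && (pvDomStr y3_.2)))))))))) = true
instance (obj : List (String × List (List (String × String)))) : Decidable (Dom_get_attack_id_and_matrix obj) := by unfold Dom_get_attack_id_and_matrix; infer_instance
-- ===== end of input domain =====

-- B change (objective 'simpler'): one pass with a first-external_id fallback instead of A's two passes.

-- MATRIX_MAP lookup (module-level constant shared by both programs); first-match dict lookup
def mmGet? (s : String) : Option String :=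
  if s = "mitre-attack" then some "Enterprise"
  else if s = "mitre-ics-attack" then some "ICS"
  else if s = "mitre-mobile-attack" then some "Mobile"
  else none

-- obj.get("external_references", [])
def refsOf (obj : List (String × List (List (String × String)))) : List (List (String × String)) :=
  (obj.lookup "external_references").getD []

-- ===== PORT A =====
-- first loop: src in MATRIX_MAP and "external_id" in ref → return (ref["external_id"], MATRIX_MAP[src])
def aLoop1 : List (List (String × String)) → Option (String × String)
  | [] => none
  | ref :: rest =>
    match (ref.lookup "source_name").bind mmGet? with
    | some m =>
      match ref.lookup "external_id" with
      | some eid => some (eid, m)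
      | none => aLoop1 rest
    | none => aLoop1 rest

-- second loop: first ref with "external_id"
def aLoop2 : List (List (String × String)) → Option String
  | [] => none
  | ref :: rest =>
    match ref.lookup "external_id" with
    | some eid => some eid
    | none => aLoop2 rest

def get_attack_id_and_matrix (obj : List (String × List (List (String × String)))) : String × String :=
  match aLoop1 (refsOf obj) with
  | some r => r
  | none =>
    match aLoop2 (refsOf obj) with
    | some eid => (eid, "")
    | none => ("", "")

-- ===== PORT B =====
-- single loop carrying the fallback (None = no external_id seen yet)
def bLoop : List (List (String × String)) → Option String → String × String
  | [], fb => match fb with | some e => (e, "") | none => ("", "")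
  | ref :: rest, fb =>
    match ref.lookup "external_id" with
    | some eid =>
      match (ref.lookup "source_name").bind mmGet? with
      | some m => (eid, m)
      | none => bLoop rest (if fb.isNone then some eid else fb)
    | none => bLoop rest fb

def get_attack_id_and_matrix_alt (obj : List (String × List (List (String × String)))) : String × String :=
  bLoop (refsOf obj) none

-- ===== PRECONDITION & SPEC =====
def Spec_get_attack_id_and_matrix (obj : List (String × List (List (String × String)))) (out : String × String) : Prop := out = get_attack_id_and_matrix_alt obj
instance (obj : List (String × List (List (String × String)))) (out : String × String) : Decidable (Spec_get_attack_id_and_matrix obj out) := by unfold Spec_get_attack_id_and_matrix; infer_instance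

-- ===== CLAIM (what is proved, stated in full; the proofs are below) =====
def Claim_equal_get_attack_id_and_matrix : Prop := ∀ (obj : List (String × List (List (String × String)))), Dom_get_attack_id_and_matrix obj → Spec_get_attack_id_and_matrix obj (get_attack_id_and_matrix obj)

-- ===== LEMMAS AND PROOFS =====

-- invariant of B's loop: a matrix match wins; otherwise the carried fallback, then the first later external_id
theorem bLoop_eq (refs : List (List (String × String))) (fb : Option String) :
    bLoop refs fb =
      match aLoop1 refs with
      | some r => r
      | none =>
        match fb with
        | some e => (e, "")
        | none =>
          match aLoop2 refs with
          | some eid => (eid, "")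
          | none => ("", "") := by
  induction refs generalizing fb with
  | nil => cases fb <;> simp [bLoop, aLoop1, aLoop2]
  | cons ref rest ih =>
    simp only [bLoop, aLoop1, aLoop2]
    cases h1 : ref.lookup "external_id" with
    | none =>
      cases h2 : (ref.lookup "source_name").bind mmGet? with
      | none => simp [ih]
      | some m => simp [ih]
    | some eid =>
      cases h2 : (ref.lookup "source_name").bind mmGet? with
      | none =>
        cases fb with
        | none => simp [ih]
        | some e => simp [ih]
      | some m => simp

-- ===== VERDICT (by name: the statement is the Claim_ definition above) =====
theorem get_attack_id_and_matrix_spec : Claim_equal_get_attack_id_and_matrix := by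
  intro obj _
  unfold Spec_get_attack_id_and_matrix get_attack_id_and_matrix get_attack_id_and_matrix_alt
  rw [bLoop_eq]
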